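-- pv_equiv track=rewrite | github.com/vtsozik/interviews | 2020/macquarie/contest/balancedelims.py | balanceDelims
-- ===== SOURCE A (Python) =====
-- def balanceDelims(s):
--     m = {')':'(', ']':'[', '}':'{'}
--     st = []
--     for c in s.rstrip():
--         if c in m:
--             if st:
--                 p = st.pop()
--                 if m[c] == p:
--                     continue
--             return False
--         else:
--             st.append(c)
--     return (not bool(st))
-- ===== SOURCE B (Python) =====
-- def _one_pass(t):
--     # one left-to-right sweep deleting non-overlapping adjacent matched pairs
--     out = []
--     i = 0
--     while i < len(t):
--         if i + 1 < len(t) and (t[i], t[i + 1]) in (('(', ')'), ('[', ']'), ('{', '}')):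
--             i += 2
--         else:
--             out.append(t[i])
--             i += 1
--     return out
--
--
-- def balanceDelims(s):
--     # Reduce to a fixpoint: repeatedly delete adjacent matched pairs; balanced iff nothing is left.
--     t = list(s.rstrip())
--     while True:
--         u = _one_pass(t)
--         if u == t:
--             return not t
--         t = u
-- ===== Notes on version B (the rewrite author's own statement) =====
-- stated objective: alternative
-- what changed: Replaces the one-pass explicit stack with iterated reduction: repeatedly sweep the rstripped string deleting adjacent matched bracket pairs until a fixpoint is reached, and report balanced iff the fixpoint is empty.
import Mathlib
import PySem

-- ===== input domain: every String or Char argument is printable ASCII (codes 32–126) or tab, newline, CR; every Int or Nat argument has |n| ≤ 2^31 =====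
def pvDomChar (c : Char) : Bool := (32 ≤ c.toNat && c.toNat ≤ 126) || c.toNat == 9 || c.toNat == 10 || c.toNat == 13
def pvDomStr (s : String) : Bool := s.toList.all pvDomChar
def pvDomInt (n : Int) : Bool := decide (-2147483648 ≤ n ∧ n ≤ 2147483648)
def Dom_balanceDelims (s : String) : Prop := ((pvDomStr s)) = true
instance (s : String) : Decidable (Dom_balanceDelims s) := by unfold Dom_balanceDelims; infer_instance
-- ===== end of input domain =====

-- B replaces A's explicit stack by iterated deletion of adjacent matched pairs to a fixpoint (alternative algorithm, not faster).

-- ===== PORT A =====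
-- m = {')':'(', ']':'[', '}':'{'} : 'c in m' is pvIsCloser, 'm[c]' is pvMatchOpen
def pvIsCloser (c : Char) : Bool := c == ')' || c == ']' || c == '}'
def pvMatchOpen (c : Char) : Char := if c == ')' then '(' else if c == ']' then '[' else '{'

-- the for-loop of A over the remaining characters, with the stack st
def pvRunA : List Char → List Char → Bool
  | st, [] => st.isEmpty
  | st, c :: r =>
    if pvIsCloser c then
      match st with
      | [] => false
      | p :: st' => if pvMatchOpen c == p then pvRunA st' r else false
    else pvRunA (c :: st) r

def balanceDelims (s : String) : Bool := pvRunA [] (PySem.Chars.rstrip s.toList)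

-- ===== PORT B =====
def pvIsPair (a b : Char) : Bool :=
  (a == '(' && b == ')') || (a == '[' && b == ']') || (a == '{' && b == '}')

-- _one_pass: one left-to-right sweep deleting non-overlapping adjacent matched pairs
def pvOnePass : List Char → List Char
  | [] => []
  | [a] => [a]
  | a :: b :: r => if pvIsPair a b then pvOnePass r else a :: pvOnePass (b :: r)
termination_by l => l.length
decreasing_by all_goals (simp only [List.length_cons]; omega)

theorem pvOnePass_length_le (l : List Char) : (pvOnePass l).length ≤ l.length := by
  induction l using pvOnePass.induct with
  | case1 => simp [pvOnePass]
  | case2 a => simp [pvOnePass]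
  | case3 a b r h ih => rw [pvOnePass, if_pos h]; simp only [List.length_cons]; omega
  | case4 a b r h ih => rw [pvOnePass, if_neg h]; simp only [List.length_cons] at *; omega

theorem pvOnePass_ne_lt (l : List Char) (h : pvOnePass l ≠ l) :
    (pvOnePass l).length < l.length := by
  induction l using pvOnePass.induct with
  | case1 => exact absurd (by rw [pvOnePass]) h
  | case2 a => exact absurd (by rw [pvOnePass]) h
  | case3 a b r hp ih =>
    rw [pvOnePass, if_pos hp]
    have := pvOnePass_length_le r
    simp only [List.length_cons]; omega
  | case4 a b r hp ih =>
    rw [pvOnePass, if_neg hp] at h ⊢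
    have hne : pvOnePass (b :: r) ≠ b :: r := by
      intro he; exact h (by rw [he])
    have := ih hne
    simp only [List.length_cons] at *; omega

-- the outer while-loop: iterate _one_pass until a fixpoint
def pvLoop (l : List Char) : List Char :=
  if pvOnePass l = l then l else pvLoop (pvOnePass l)
termination_by l.length
decreasing_by exact pvOnePass_ne_lt _ (by assumption)

def balanceDelims_alt (s : String) : Bool :=
  (pvLoop (PySem.Chars.rstrip s.toList)).isEmpty

-- ===== PRECONDITION & SPEC =====
def Spec_balanceDelims (s : String) (out : Bool) : Prop := out = balanceDelims_alt s
instance (s : String) (out : Bool) : Decidable (Spec_balanceDelims s out) := by unfold Spec_balanceDelims; infer_instance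

-- ===== CLAIM (what is proved, stated in full; the proofs are below) =====
def Claim_equal_balanceDelims : Prop := ∀ (s : String), Dom_balanceDelims s → Spec_balanceDelims s (balanceDelims s)

-- ===== LEMMAS AND PROOFS =====

theorem pvRunA_cons_arg (st : List Char) (c : Char) (r : List Char) :
    pvRunA st (c :: r) =
      if pvIsCloser c then
        (match st with
         | [] => false
         | p :: st' => if pvMatchOpen c == p then pvRunA st' r else false)
      else pvRunA (c :: st) r := rfl

-- one-step deletion of an adjacent matched pair, anywhere
def pvRed (l l' : List Char) : Prop :=
  ∃ x y a b, pvIsPair a b = true ∧ l = x ++ a :: b :: y ∧ l' = x ++ y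

theorem pvPair_chars {a b : Char} (h : pvIsPair a b = true) :
    pvIsCloser b = true ∧ pvIsCloser a = false ∧ pvMatchOpen b = a := by
  simp only [pvIsPair, Bool.or_eq_true, Bool.and_eq_true, beq_iff_eq] at h
  rcases h with (⟨ha, hb⟩ | ⟨ha, hb⟩) | ⟨ha, hb⟩ <;> subst ha <;> subst hb <;> decide

theorem pvMatch_eq_pair {c : Char} (p : Char) (hc : pvIsCloser c = true) :
    (pvMatchOpen c == p) = pvIsPair p c := by
  simp only [pvIsCloser, Bool.or_eq_true, beq_iff_eq] at hc
  rcases hc with (h | h) | h <;> subst h <;>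
    simp [pvMatchOpen, pvIsPair, eq_comm]

theorem pvRed_length {l l' : List Char} (h : pvRed l l') : l'.length + 2 = l.length := by
  obtain ⟨x, y, a, b, _, rfl, rfl⟩ := h
  simp [List.length_append]; omega

theorem pvRed_cons {l l' : List Char} (a : Char) (h : pvRed l l') : pvRed (a :: l) (a :: l') := by
  obtain ⟨x, y, u, v, hp, rfl, rfl⟩ := h
  exact ⟨a :: x, y, u, v, hp, rfl, rfl⟩

theorem pvRTG_cons {l l' : List Char} (a : Char) (h : Relation.ReflTransGen pvRed l l') :
    Relation.ReflTransGen pvRed (a :: l) (a :: l') :=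
  Relation.ReflTransGen.lift (a :: ·) (fun _ _ hr => pvRed_cons a hr) h

theorem pvRTG_onePass (l : List Char) : Relation.ReflTransGen pvRed l (pvOnePass l) := by
  induction l using pvOnePass.induct with
  | case1 => rw [pvOnePass]
  | case2 a => rw [pvOnePass]
  | case3 a b r h ih =>
    rw [pvOnePass, if_pos h]
    exact Relation.ReflTransGen.head ⟨[], r, a, b, h, rfl, rfl⟩ ih
  | case4 a b r h ih =>
    rw [pvOnePass, if_neg h]
    exact pvRTG_cons a ih

def pvNormal (l : List Char) : Prop := ∀ l', ¬ pvRed l l'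

theorem pvOnePass_ne_of_pair :
    ∀ (x : List Char) (a b : Char) (y : List Char), pvIsPair a b = true →
    pvOnePass (x ++ a :: b :: y) ≠ x ++ a :: b :: y := by
  intro x
  induction x with
  | nil =>
    intro a b y hp h
    simp only [List.nil_append] at h
    rw [pvOnePass, if_pos hp] at h
    have h1 := pvOnePass_length_le y
    have h2 := congrArg List.length h
    simp only [List.length_cons] at h2; omega
  | cons e x' ih =>
    intro a b y hp h
    simp only [List.cons_append] at h
    obtain ⟨f, m, hm⟩ :=
      List.exists_cons_of_ne_nil (show (x' ++ a :: b :: y : List Char) ≠ [] by simp)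
    rw [hm] at h
    by_cases hef : pvIsPair e f = true
    · rw [pvOnePass, if_pos hef] at h
      have h1 := pvOnePass_length_le m
      have h2 := congrArg List.length h
      simp only [List.length_cons] at h2; omega
    · rw [pvOnePass, if_neg hef] at h
      exact ih a b y hp (by rw [hm]; exact (List.cons.inj h).2)

theorem pvFix_normal {l : List Char} (h : pvOnePass l = l) : pvNormal l := by
  intro l' hr
  obtain ⟨x, y, a, b, hp, rfl, rfl⟩ := hr
  exact pvOnePass_ne_of_pair x a b y hp h

-- every list reaches pvLoop l, and pvLoop l is a normal form
theorem pvLoop_fix (l : List Char) : pvOnePass (pvLoop l) = pvLoop l := by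
  induction l using pvLoop.induct with
  | case1 l h => rw [pvLoop, if_pos h]; exact h
  | case2 l h ih => rw [pvLoop, if_neg h]; exact ih

theorem pvRTG_loop (l : List Char) : Relation.ReflTransGen pvRed l (pvLoop l) := by
  induction l using pvLoop.induct with
  | case1 l h => rw [pvLoop, if_pos h]
  | case2 l h ih =>
    rw [pvLoop, if_neg h]
    exact Relation.ReflTransGen.trans (pvRTG_onePass l) ih

theorem pvLoop_normal (l : List Char) : pvNormal (pvLoop l) := pvFix_normal (pvLoop_fix l)

-- decomposition of two two-character patterns inside the same list
theorem pvSplit2 :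
    ∀ (x : List Char) (p c : Char) (y u : List Char) (a b : Char) (v : List Char),
    x ++ p :: c :: y = u ++ a :: b :: v →
    (x = u ∧ p = a ∧ c = b ∧ y = v) ∨
    (∃ z, u = x ++ p :: c :: z ∧ y = z ++ a :: b :: v) ∨
    (∃ z, x = u ++ a :: b :: z ∧ v = z ++ p :: c :: y) ∨
    b = p ∨ a = c := by
  intro x
  induction x with
  | nil =>
    intro p c y u a b v h
    cases u with
    | nil =>
      simp only [List.nil_append, List.cons.injEq] at h
      exact Or.inl ⟨rfl, h.1, h.2.1, h.2.2⟩
    | cons e u' =>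
      simp only [List.nil_append, List.cons_append, List.cons.injEq] at h
      obtain ⟨rfl, h⟩ := h
      cases u' with
      | nil =>
        simp only [List.nil_append, List.cons.injEq] at h
        exact Or.inr (Or.inr (Or.inr (Or.inr h.1.symm)))
      | cons f u'' =>
        simp only [List.cons_append, List.cons.injEq] at h
        obtain ⟨rfl, h⟩ := h
        exact Or.inr (Or.inl ⟨u'', by simp, h⟩)
  | cons e x' ih =>
    intro p c y u a b v h
    cases u with
    | nil =>
      simp only [List.cons_append, List.nil_append, List.cons.injEq] at h
      obtain ⟨rfl, h⟩ := h
      cases x' with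
      | nil =>
        simp only [List.nil_append, List.cons.injEq] at h
        exact Or.inr (Or.inr (Or.inr (Or.inl h.1.symm)))
      | cons f x'' =>
        simp only [List.cons_append, List.cons.injEq] at h
        obtain ⟨rfl, h⟩ := h
        exact Or.inr (Or.inr (Or.inl ⟨x'', by simp, h.symm⟩))
    | cons f u' =>
      simp only [List.cons_append, List.cons.injEq] at h
      obtain ⟨rfl, h⟩ := h
      rcases ih p c y u' a b v h with h1 | ⟨z, hz1, hz2⟩ | ⟨z, hz1, hz2⟩ | h4 | h5
      · exact Or.inl ⟨by rw [h1.1], h1.2.1, h1.2.2.1, h1.2.2.2⟩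
      · exact Or.inr (Or.inl ⟨z, by rw [hz1]; rfl, hz2⟩)
      · exact Or.inr (Or.inr (Or.inl ⟨z, by rw [hz1]; rfl, hz2⟩))
      · exact Or.inr (Or.inr (Or.inr (Or.inl h4)))
      · exact Or.inr (Or.inr (Or.inr (Or.inr h5)))

theorem pvDiamond {l l1 l2 : List Char} (h1 : pvRed l l1) (h2 : pvRed l l2) :
    l1 = l2 ∨ ∃ m, pvRed l1 m ∧ pvRed l2 m := by
  obtain ⟨x1, y1, a1, b1, hp1, rfl, rfl⟩ := h1
  obtain ⟨x2, y2, a2, b2, hp2, he, rfl⟩ := h2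
  rcases pvSplit2 x1 a1 b1 y1 x2 a2 b2 y2 he with h | ⟨z, hz1, hz2⟩ | ⟨z, hz1, hz2⟩ | h4 | h5
  · obtain ⟨rfl, rfl, rfl, rfl⟩ := h; exact Or.inl rfl
  · refine Or.inr ⟨x1 ++ z ++ y2, ?_, ?_⟩
    · exact ⟨x1 ++ z, y2, a2, b2, hp2, by rw [hz2]; simp, by simp⟩
    · exact ⟨x1, z ++ y2, a1, b1, hp1, by rw [hz1]; simp, by simp⟩
  · refine Or.inr ⟨x2 ++ z ++ y1, ?_, ?_⟩
    · exact ⟨x2, z ++ y1, a2, b2, hp2, by rw [hz1]; simp, by simp⟩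
    · exact ⟨x2 ++ z, y1, a1, b1, hp1, by rw [hz2]; simp, by simp⟩
  · have t1 := (pvPair_chars hp1).2.1
    have t2 := (pvPair_chars hp2).1
    rw [h4] at t2; simp_all
  · have t1 := (pvPair_chars hp2).2.1
    have t2 := (pvPair_chars hp1).1
    rw [h5] at t1; simp_all

theorem pvNF_unique :
    ∀ (k : ℕ) (l n1 n2 : List Char), l.length ≤ k →
    Relation.ReflTransGen pvRed l n1 → pvNormal n1 →
    Relation.ReflTransGen pvRed l n2 → pvNormal n2 → n1 = n2 := by
  intro k
  induction k with
  | zero =>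
    intro l n1 n2 hk h1 hn1 h2 hn2
    have hl : l = [] := List.eq_nil_of_length_eq_zero (Nat.le_zero.mp hk)
    subst hl
    rcases Relation.ReflTransGen.cases_head h1 with rfl | ⟨m, hm, _⟩
    · rcases Relation.ReflTransGen.cases_head h2 with rfl | ⟨m, hm, _⟩
      · rfl
      · obtain ⟨x, y, a, b, _, hx, _⟩ := hm; simp at hx
    · obtain ⟨x, y, a, b, _, hx, _⟩ := hm; simp at hx
  | succ k ih =>
    intro l n1 n2 hk h1 hn1 h2 hn2
    rcases Relation.ReflTransGen.cases_head h1 with rfl | ⟨m1, hm1, h1'⟩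
    · rcases Relation.ReflTransGen.cases_head h2 with rfl | ⟨m2, hm2, _⟩
      · rfl
      · exact absurd hm2 (hn1 m2)
    · rcases Relation.ReflTransGen.cases_head h2 with rfl | ⟨m2, hm2, h2'⟩
      · exact absurd hm1 (hn2 m1)
      · have hlen1 : m1.length ≤ k := by have := pvRed_length hm1; omega
        rcases pvDiamond hm1 hm2 with rfl | ⟨m, hmm1, hmm2⟩
        · exact ih m1 n1 n2 hlen1 h1' hn1 h2' hn2
        · have hlen2 : m2.length ≤ k := by have := pvRed_length hm2; omega
          have h3 : Relation.ReflTransGen pvRed m (pvLoop m) := pvRTG_loop m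
          have hn3 : pvNormal (pvLoop m) := pvLoop_normal m
          have e1 : n1 = pvLoop m :=
            ih m1 n1 (pvLoop m) hlen1 h1' hn1 (Relation.ReflTransGen.head hmm1 h3) hn3
          have e2 : n2 = pvLoop m :=
            ih m2 n2 (pvLoop m) hlen2 h2' hn2 (Relation.ReflTransGen.head hmm2 h3) hn3
          rw [e1, e2]

theorem pvLoop_eq_of_rtg {l l' : List Char} (h : Relation.ReflTransGen pvRed l l') :
    pvLoop l = pvLoop l' :=
  pvNF_unique l.length l (pvLoop l) (pvLoop l') le_rfl (pvRTG_loop l) (pvLoop_normal l)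
    (Relation.ReflTransGen.trans h (pvRTG_loop l')) (pvLoop_normal l')

-- match case: deleting a matched pair does not change the normal form
theorem pvLoop_pair {p c : Char} (hp : pvIsPair p c = true) (x y : List Char) :
    pvLoop (x ++ p :: c :: y) = pvLoop (x ++ y) :=
  pvLoop_eq_of_rtg (Relation.ReflTransGen.single ⟨x, y, p, c, hp, rfl, rfl⟩)

-- a list without closers is already normal
theorem pvLoop_noCloser {l : List Char} (h : ∀ ch ∈ l, pvIsCloser ch = false) :
    pvLoop l = l := by
  have hfix : pvOnePass l = l := by
    induction l using pvOnePass.induct with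
    | case1 => rw [pvOnePass]
    | case2 a => rw [pvOnePass]
    | case3 a b r hp ih =>
      have hb := (pvPair_chars hp).1
      have := h b (by simp)
      simp_all
    | case4 a b r hp ih =>
      rw [pvOnePass, if_neg hp]
      have := ih (fun ch hch => h ch (List.mem_cons_of_mem a hch))
      rw [this]
  rw [pvLoop, if_pos hfix]

-- a leading closer can never be deleted
theorem pvOnePass_closer_cons {c : Char} (hc : pvIsCloser c = true) (l : List Char) :
    pvOnePass (c :: l) = c :: pvOnePass l := by
  cases l with
  | nil => rw [pvOnePass, pvOnePass]
  | cons b r =>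
    have hnp : pvIsPair c b ≠ true := by
      intro hp; have := (pvPair_chars hp).2.1; simp_all
    rw [pvOnePass, if_neg hnp]

theorem pvLoop_closer_cons {c : Char} (hc : pvIsCloser c = true) :
    ∀ (l : List Char), pvLoop (c :: l) = c :: pvLoop l := by
  intro l
  induction l using pvLoop.induct with
  | case1 l hfix =>
    have h2 : pvOnePass (c :: l) = c :: l := by rw [pvOnePass_closer_cons hc, hfix]
    rw [pvLoop, if_pos h2, pvLoop, if_pos hfix]
  | case2 l hfix ih =>
    have hne : pvOnePass (c :: l) ≠ c :: l := by
      rw [pvOnePass_closer_cons hc]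
      intro he; exact hfix (List.cons.inj he).2
    rw [pvLoop, if_neg hne, pvOnePass_closer_cons hc, ih]
    conv_rhs => rw [pvLoop, if_neg hfix]

-- mismatch case: a non-closer immediately followed by a non-matching closer survives every reduction
theorem pvRed_keeps_pc {p c : Char} (hpc : pvIsCloser p = false) (hc : pvIsCloser c = true)
    (hnp : pvIsPair p c = false) {l l' : List Char} (hr : pvRed l l')
    (h : ∃ x y, l = x ++ p :: c :: y) : ∃ x y, l' = x ++ p :: c :: y := by
  obtain ⟨x, y, rfl⟩ := h
  obtain ⟨u, v, a, b, hp, he, rfl⟩ := hr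
  rcases pvSplit2 x p c y u a b v he with h1 | ⟨z, hz1, hz2⟩ | ⟨z, hz1, hz2⟩ | h4 | h5
  · obtain ⟨rfl, rfl, rfl, rfl⟩ := h1; rw [hp] at hnp; exact absurd hnp (by simp)
  · exact ⟨x, z ++ v, by rw [hz1]; simp⟩
  · exact ⟨u ++ z, y, by rw [hz2]; simp⟩
  · have := (pvPair_chars hp).1; rw [h4] at this; simp_all
  · have := (pvPair_chars hp).2.1; rw [← h5] at hc; simp_all
theorem pvLoop_blocked {p c : Char} (hpc : pvIsCloser p = false) (hc : pvIsCloser c = true)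
    (hnp : pvIsPair p c = false) (x y : List Char) :
    pvLoop (x ++ p :: c :: y) ≠ [] := by
  have hkeep : ∀ {l l' : List Char}, Relation.ReflTransGen pvRed l l' →
      (∃ u v, l = u ++ p :: c :: v) → ∃ u v, l' = u ++ p :: c :: v := by
    intro l l' h
    induction h with
    | refl => exact id
    | tail _ hstep ih =>
      intro hl
      exact pvRed_keeps_pc hpc hc hnp hstep (ih hl)
  obtain ⟨u, v, hv⟩ := hkeep (pvRTG_loop (x ++ p :: c :: y)) ⟨x, y, rfl⟩
  rw [hv]; simp

-- the invariant connecting A's stack run with B's fixpoint reduction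
theorem pvMain : ∀ (r st : List Char), (∀ ch ∈ st, pvIsCloser ch = false) →
    (pvRunA st r = true ↔ pvLoop (st.reverse ++ r) = []) := by
  intro r
  induction r with
  | nil =>
    intro st hst
    have : pvLoop (st.reverse ++ []) = st.reverse := by
      rw [List.append_nil]
      exact pvLoop_noCloser (fun ch hch => hst ch (List.mem_reverse.mp hch))
    rw [this]
    simp [pvRunA, List.isEmpty_iff, List.reverse_eq_nil_iff]
  | cons c r ih =>
    intro st hst
    by_cases hc : pvIsCloser c = true
    · cases st with
      | nil =>
        rw [show pvRunA [] (c :: r) = false by simp [pvRunA_cons_arg, hc]]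
        simp only [List.reverse_nil, List.nil_append]
        rw [pvLoop_closer_cons hc]
        simp
      | cons p st' =>
        have hp : pvIsCloser p = false := hst p (by simp)
        have hst' : ∀ ch ∈ st', pvIsCloser ch = false :=
          fun ch hch => hst ch (List.mem_cons_of_mem p hch)
        have hsplit : (p :: st').reverse ++ c :: r = st'.reverse ++ p :: c :: r := by
          simp
        by_cases hm : pvIsPair p c = true
        · have hbeq : (pvMatchOpen c == p) = true := by rw [pvMatch_eq_pair p hc]; exact hm
          rw [show pvRunA (p :: st') (c :: r) = pvRunA st' r by
            simp [pvRunA_cons_arg, hc, hbeq]]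
          rw [hsplit, pvLoop_pair hm]
          exact ih st' hst'
        · have hbeq : (pvMatchOpen c == p) = false := by
            rw [pvMatch_eq_pair p hc]; exact eq_false_of_ne_true hm
          rw [show pvRunA (p :: st') (c :: r) = false by
            simp [pvRunA_cons_arg, hc, hbeq]]
          rw [hsplit]
          simp only [Bool.false_eq_true, false_iff]
          exact pvLoop_blocked hp hc (eq_false_of_ne_true hm) st'.reverse r
    · have hcf : pvIsCloser c = false := eq_false_of_ne_true hc
      rw [show pvRunA st (c :: r) = pvRunA (c :: st) r by simp [pvRunA_cons_arg, hcf]]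
      have hst2 : ∀ ch ∈ c :: st, pvIsCloser ch = false := by
        intro ch hch
        rcases List.mem_cons.mp hch with rfl | hch
        · exact hcf
        · exact hst ch hch
      have := ih (c :: st) hst2
      rw [this]
      simp [List.append_assoc]

-- ===== VERDICT (by name: the statement is the Claim_ definition above) =====
theorem balanceDelims_spec : Claim_equal_balanceDelims := by
  intro s _
  unfold Spec_balanceDelims balanceDelims balanceDelims_alt
  have h := pvMain (PySem.Chars.rstrip s.toList) [] (by simp)
  simp only [List.reverse_nil, List.nil_append] at h
  by_cases hA : pvRunA [] (PySem.Chars.rstrip s.toList) = true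
  · rw [hA, (h.mp hA)]; rfl
  · rw [eq_false_of_ne_true hA]
    have : pvLoop (PySem.Chars.rstrip s.toList) ≠ [] := fun he => hA (h.mpr he)
    simp [this]
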